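-- pv_equiv track=rewrite | github.com/kabiyangyang/Eye-movement-classification | own_ml_test.py | get_arff_attributes_to_keep
-- ===== SOURCE A (Python) =====
-- def get_arff_attributes_to_keep(features):
--     keys_to_keep = []
--     if 'xy' in features:
--         keys_to_keep += ['x', 'y']
--     if 'speed' in features:
--         keys_to_keep += ['speed_{}'.format(i) for i in (1, 2, 4, 8, 16)[4:5]]
--     if 'direction' in features:
--         keys_to_keep += ['direction_{}'.format(i) for i in (1, 2, 4, 8, 16)[:5]]
--     if 'acc' in features:
--         keys_to_keep += ['acceleration_{}'.format(i) for i in (1, 2, 4, 8, 16)[:5]]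
--
--     if 'dir_dis' in features:
--         keys_to_keep += ['dir_dis_{}'.format(i) for i in (8, 16, 24, 32)[:4]]
--
--     if 'flow_speed' in features:
--         keys_to_keep += ['flow_speed_{}'.format(i) for i in (1, 2, 4, 8, 16)[:4]]
--
--     if 'speed_dis' in features:
--         keys_to_keep += ['speed_dis_{}'.format(i) for i in (1, 2, 4, 8, 16)[:5]]
--
--     return keys_to_keep
-- ===== SOURCE B (Python) =====
-- _SPEC = [
--     ('xy', ['x', 'y']),
--     ('speed', ['speed_16']),
--     ('direction', ['direction_%d' % i for i in (1, 2, 4, 8, 16)]),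
--     ('acc', ['acceleration_%d' % i for i in (1, 2, 4, 8, 16)]),
--     ('dir_dis', ['dir_dis_%d' % i for i in (8, 16, 24, 32)]),
--     ('flow_speed', ['flow_speed_%d' % i for i in (1, 2, 4, 8)]),
--     ('speed_dis', ['speed_dis_%d' % i for i in (1, 2, 4, 8, 16)]),
-- ]
--
--
-- def get_arff_attributes_to_keep(features):
--     # build the set of present features once (single scan of the input),
--     # then emit the output recursively, constructing it back-to-front
--     present = frozenset(features)
--
--     def emit(spec):
--         if not spec:
--             return []
--         flag, names = spec[0]
--         rest = emit(spec[1:])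
--         return names + rest if flag in present else rest
--
--     return emit(_SPEC)
-- ===== Notes on version B (the rewrite author's own statement) =====
-- stated objective: alternative
-- what changed: B scans the input once to build a frozenset of present features, then emits the result by a recursion over a flag->names spec that constructs the output back-to-front, instead of A's seven sequential membership scans each appending to an accumulator.
import Mathlib
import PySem

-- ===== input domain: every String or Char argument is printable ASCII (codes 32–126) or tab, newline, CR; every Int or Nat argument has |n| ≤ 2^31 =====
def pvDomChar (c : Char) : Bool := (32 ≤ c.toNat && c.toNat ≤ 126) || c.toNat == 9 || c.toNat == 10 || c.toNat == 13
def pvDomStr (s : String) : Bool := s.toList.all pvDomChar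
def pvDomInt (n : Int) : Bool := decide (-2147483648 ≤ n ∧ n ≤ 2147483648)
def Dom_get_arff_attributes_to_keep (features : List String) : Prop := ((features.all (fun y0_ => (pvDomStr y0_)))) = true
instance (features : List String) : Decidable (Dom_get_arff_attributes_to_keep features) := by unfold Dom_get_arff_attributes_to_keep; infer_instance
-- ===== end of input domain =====

-- B builds a set of present features in one pass and emits names by recursion over a spec table (back-to-front), instead of A's seven membership scans with an accumulator; objective: alternative.


-- ===== PORT A =====
def get_arff_attributes_to_keep (features : List String) : List String :=
  let keys_to_keep : List String := []
  let keys_to_keep := if "xy" ∈ features then keys_to_keep ++ ["x", "y"] else keys_to_keep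
  let keys_to_keep := if "speed" ∈ features then
      keys_to_keep ++ (PySem.List.slice ([(1:Int), 2, 4, 8, 16]) (some 4) (some 5)).map
        (fun i => "speed_" ++ PySem.Int.toStr i)
    else keys_to_keep
  let keys_to_keep := if "direction" ∈ features then
      keys_to_keep ++ (PySem.List.slice ([(1:Int), 2, 4, 8, 16]) none (some 5)).map
        (fun i => "direction_" ++ PySem.Int.toStr i)
    else keys_to_keep
  let keys_to_keep := if "acc" ∈ features then
      keys_to_keep ++ (PySem.List.slice ([(1:Int), 2, 4, 8, 16]) none (some 5)).map
        (fun i => "acceleration_" ++ PySem.Int.toStr i)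
    else keys_to_keep
  let keys_to_keep := if "dir_dis" ∈ features then
      keys_to_keep ++ (PySem.List.slice ([(8:Int), 16, 24, 32]) none (some 4)).map
        (fun i => "dir_dis_" ++ PySem.Int.toStr i)
    else keys_to_keep
  let keys_to_keep := if "flow_speed" ∈ features then
      keys_to_keep ++ (PySem.List.slice ([(1:Int), 2, 4, 8, 16]) none (some 4)).map
        (fun i => "flow_speed_" ++ PySem.Int.toStr i)
    else keys_to_keep
  let keys_to_keep := if "speed_dis" ∈ features then
      keys_to_keep ++ (PySem.List.slice ([(1:Int), 2, 4, 8, 16]) none (some 5)).map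
        (fun i => "speed_dis_" ++ PySem.Int.toStr i)
    else keys_to_keep
  keys_to_keep

-- ===== PORT B =====
-- the spec table ('direction_%d' % i etc. precomputed as literals, exact on this fixed data)
def pvSpec : List (String × List String) :=
  [("xy", ["x", "y"]),
   ("speed", ["speed_16"]),
   ("direction", ["direction_1", "direction_2", "direction_4", "direction_8", "direction_16"]),
   ("acc", ["acceleration_1", "acceleration_2", "acceleration_4", "acceleration_8", "acceleration_16"]),
   ("dir_dis", ["dir_dis_8", "dir_dis_16", "dir_dis_24", "dir_dis_32"]),
   ("flow_speed", ["flow_speed_1", "flow_speed_2", "flow_speed_4", "flow_speed_8"]),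
   ("speed_dis", ["speed_dis_1", "speed_dis_2", "speed_dis_4", "speed_dis_8", "speed_dis_16"])]

-- B's inner 'emit': recursion over the spec, building the result back-to-front
def pvEmit (present : PySem.Set String) : List (String × List String) → List String
  | [] => []
  | (flag, names) :: spec =>
      let rest := pvEmit present spec
      if PySem.Set.contains present flag then names ++ rest else rest

def get_arff_attributes_to_keep_alt (features : List String) : List String :=
  pvEmit (PySem.Set.ofList features) pvSpec

-- ===== PRECONDITION & SPEC =====
def Spec_get_arff_attributes_to_keep (features : List String) (out : List String) : Prop := out = get_arff_attributes_to_keep_alt features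
instance (features : List String) (out : List String) : Decidable (Spec_get_arff_attributes_to_keep features out) := by unfold Spec_get_arff_attributes_to_keep; infer_instance

-- ===== CLAIM (what is proved, stated in full; the proofs are below) =====
def Claim_equal_get_arff_attributes_to_keep : Prop := ∀ (features : List String), Dom_get_arff_attributes_to_keep features → Spec_get_arff_attributes_to_keep features (get_arff_attributes_to_keep features)

-- ===== LEMMAS AND PROOFS =====
-- pvEmit over a present-set equals the pointwise membership filter-and-flatten
theorem pvEmit_eq_flatMap (fs : List String) (spec : List (String × List String)) :
    pvEmit (PySem.Set.ofList fs) spec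
      = spec.flatMap (fun p => if p.1 ∈ fs then p.2 else []) := by
  induction spec with
  | nil => rfl
  | cons p rest ih =>
      obtain ⟨flag, names⟩ := p
      simp only [pvEmit, ih, List.flatMap_cons]
      by_cases h : flag ∈ fs
      · rw [if_pos h, if_pos (by simpa [PySem.Set.mem_ofList] using h)]
      · rw [if_neg h, if_neg (by simpa [PySem.Set.mem_ofList] using h), List.nil_append]

-- ===== VERDICT (by name: the statement is the Claim_ definition above) =====
theorem get_arff_attributes_to_keep_spec : Claim_equal_get_arff_attributes_to_keep := by
  intro features _
  unfold Spec_get_arff_attributes_to_keep get_arff_attributes_to_keep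
    get_arff_attributes_to_keep_alt pvSpec
  rw [pvEmit_eq_flatMap]
  simp only [pvSpec, List.flatMap_cons, List.flatMap_nil]
  split_ifs <;> decide
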